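-- pv_equiv track=rewrite | github.com/Yeongseok-Kim/Baekjoon | 2231.py | find_costructor
-- ===== SOURCE A (Python) =====
-- def find_costructor(decomposition_sum):
--     for constructor in range(decomposition_sum):
--         constructor_sum=constructor
--         for digit in str(constructor):
--             constructor_sum+=int(digit)
--         if decomposition_sum==constructor_sum:
--             return constructor
--     return 0
-- ===== SOURCE B (Python) =====
-- def find_costructor(decomposition_sum):
--     # Only candidates c with c >= decomposition_sum - 9*len(str(decomposition_sum))
--     # can satisfy c + digitsum(c) = decomposition_sum; scan just that window ascending.
--     lo = max(0, decomposition_sum - 9 * len(str(decomposition_sum)))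
--     for c in range(lo, decomposition_sum):
--         s = sum(int(d) for d in str(c))
--         if c + s == decomposition_sum:
--             return c
--     return 0
-- ===== Notes on version B (the rewrite author's own statement) =====
-- stated objective: faster
-- what changed: Instead of scanning every candidate from 0 upward, B scans only the window [max(0, n - 9*len(str(n))), n) ascending, since any constructor c with c + digitsum(c) = n must lie in it.
import Mathlib
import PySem

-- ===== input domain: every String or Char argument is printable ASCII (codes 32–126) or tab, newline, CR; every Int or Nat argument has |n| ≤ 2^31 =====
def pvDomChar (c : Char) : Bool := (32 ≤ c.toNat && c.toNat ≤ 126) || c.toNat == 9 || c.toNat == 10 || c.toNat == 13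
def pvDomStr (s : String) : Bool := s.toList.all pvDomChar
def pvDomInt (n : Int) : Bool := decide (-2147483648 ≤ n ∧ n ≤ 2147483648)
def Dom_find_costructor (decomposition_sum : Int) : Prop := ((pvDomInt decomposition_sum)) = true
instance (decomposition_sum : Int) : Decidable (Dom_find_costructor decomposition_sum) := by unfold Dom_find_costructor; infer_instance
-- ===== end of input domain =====

-- B scans only the window [max(0, n - 9*len(str(n))), n) instead of [0, n): any constructor c
-- with c + digitsum(c) = n must lie there, so B is asymptotically faster and returns A's exact value.


-- ===== PORT A =====
-- the for-loop with early return: first constructor in the list with n == constructor_sum, else 0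
-- (int(digit) never raises here: every scanned constructor is ≥ 0, so its str() is all digits;
--  the .getD 0 is therefore never the default)
def pvScanA (n : Int) : List Int → Int
  | [] => 0
  | c :: rest =>
    -- constructor_sum = constructor; for digit in str(constructor): constructor_sum += int(digit)
    let s := (PySem.Int.toChars c).foldl (fun acc d => acc + (PySem.Int.ofChars? [d]).getD 0) c
    if n = s then c else pvScanA n rest

def find_costructor (decomposition_sum : Int) : Int :=
  pvScanA decomposition_sum (PySem.List.pyRange 0 decomposition_sum 1)

-- ===== PORT B =====
-- s = sum(int(d) for d in str(c))
def pvDigitSumB (c : Int) : Int :=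
  ((PySem.Int.toChars c).map (fun d => (PySem.Int.ofChars? [d]).getD 0)).sum

def pvScanB (n : Int) : List Int → Int
  | [] => 0
  | c :: rest => if c + pvDigitSumB c = n then c else pvScanB n rest

def find_costructor_alt (decomposition_sum : Int) : Int :=
  let lo := max 0 (decomposition_sum - 9 * PySem.Str.len (PySem.Int.toStr decomposition_sum))
  pvScanB decomposition_sum (PySem.List.pyRange lo decomposition_sum 1)

-- ===== PRECONDITION & SPEC =====
def Spec_find_costructor (decomposition_sum : Int) (out : Int) : Prop := out = find_costructor_alt decomposition_sum
instance (decomposition_sum : Int) (out : Int) : Decidable (Spec_find_costructor decomposition_sum out) := by unfold Spec_find_costructor; infer_instance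

-- ===== CLAIM (what is proved, stated in full; the proofs are below) =====
def Claim_equal_find_costructor : Prop := ∀ (decomposition_sum : Int), Dom_find_costructor decomposition_sum → Spec_find_costructor decomposition_sum (find_costructor decomposition_sum)

-- ===== LEMMAS AND PROOFS =====

-- characterisation of core's Nat.toDigits via Mathlib's Nat.digits
lemma toDigitsCore_eq_digits (n : Nat) : ∀ (f : Nat) (l : List Char), 0 < n → n < f →
    Nat.toDigitsCore 10 f n l = ((Nat.digits 10 n).map Nat.digitChar).reverse ++ l := by
  induction n using Nat.strong_induction_on with
  | _ n ih =>
    intro f l hn hf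
    match f with
    | 0 => omega
    | f + 1 =>
      rw [Nat.digits_def' (by norm_num : 1 < 10) hn]
      simp only [Nat.toDigitsCore]
      by_cases h0 : n / 10 = 0
      · simp [h0]
      · rw [if_neg h0, ih (n / 10) (Nat.div_lt_self hn (by norm_num)) f _
            (Nat.pos_of_ne_zero h0) (by omega)]
        simp

lemma toChars_of_pos (c : Int) (hc : 0 < c) :
    PySem.Int.toChars c = ((Nat.digits 10 c.toNat).map Nat.digitChar).reverse := by
  rw [PySem.Int.toChars, if_neg (by omega)]
  have := toDigitsCore_eq_digits c.toNat (c.toNat + 1) [] (by omega) (by omega)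
  simpa [Nat.toDigits] using this

-- int of a single decimal digit character
lemma ofChars_digitChar (d : Nat) (hd : d < 10) :
    (PySem.Int.ofChars? [Nat.digitChar d]).getD 0 = (d : Int) := by
  interval_cases d <;> decide

-- the common digit sum: sum of the decimal digits of c.toNat
def pvS (c : Int) : Int := ((Nat.digits 10 c.toNat).sum : Int)

lemma map_toChars_sum (c : Int) (hc : 0 ≤ c) :
    ((PySem.Int.toChars c).map (fun d => (PySem.Int.ofChars? [d]).getD 0)).sum = pvS c := by
  rcases eq_or_lt_of_le hc with h | h
  · subst c; decide
  · rw [toChars_of_pos c h, List.map_reverse, List.sum_reverse, List.map_map, pvS]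
    have : ∀ x ∈ Nat.digits 10 c.toNat,
        ((fun d => (PySem.Int.ofChars? [d]).getD 0) ∘ Nat.digitChar) x = ((x : Nat) : Int) := by
      intro x hx
      exact ofChars_digitChar x (Nat.digits_lt_base (by norm_num) hx)
    rw [List.map_congr_left this]
    simp

lemma digitSumB_eq (c : Int) (hc : 0 ≤ c) : pvDigitSumB c = pvS c := by
  rw [pvDigitSumB, map_toChars_sum c hc]

lemma foldA_eq (c : Int) (hc : 0 ≤ c) :
    (PySem.Int.toChars c).foldl (fun acc d => acc + (PySem.Int.ofChars? [d]).getD 0) c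
      = c + pvS c := by
  rw [PySem.List.foldl_add, map_toChars_sum c hc]

-- digit-sum bound: for 0 ≤ c < n, pvS c ≤ 9 * len(str(n))
lemma pvS_le (c n : Int) (hc : 0 ≤ c) (hcn : c < n) :
    pvS c ≤ 9 * PySem.Str.len (PySem.Int.toStr n) := by
  have hn : 0 < n := lt_of_le_of_lt hc hcn
  have hlen : (Nat.digits 10 c.toNat).length ≤ (Nat.digits 10 n.toNat).length := by
    rw [Nat.digits_length_le_iff (by norm_num)]
    calc c.toNat < n.toNat := by omega
    _ < 10 ^ (Nat.digits 10 n.toNat).length := Nat.lt_base_pow_length_digits (by norm_num)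
  have hsum : (Nat.digits 10 c.toNat).sum ≤ 9 * (Nat.digits 10 c.toNat).length := by
    have := List.sum_le_card_nsmul (Nat.digits 10 c.toNat) 9
      (fun x hx => by have := Nat.digits_lt_base (by norm_num : 1 < 10) hx; omega)
    simpa [Nat.smul_one_eq_cast, mul_comm] using this
  have hstr : PySem.Str.len (PySem.Int.toStr n) = ((Nat.digits 10 n.toNat).length : Int) := by
    rw [PySem.Str.len_eq, PySem.Int.toList_toStr, toChars_of_pos n hn]
    simp
  rw [pvS, hstr]
  exact_mod_cast hsum.trans (Nat.mul_le_mul_left 9 hlen)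

-- scanning a prefix with no hit is a no-op
lemma scanA_append_no_hit (n : Int) (l1 l2 : List Int)
    (h : ∀ c ∈ l1, 0 ≤ c ∧ n ≠ c + pvS c) :
    pvScanA n (l1 ++ l2) = pvScanA n l2 := by
  induction l1 with
  | nil => rfl
  | cons c rest ih =>
    obtain ⟨hc, hne⟩ := h c List.mem_cons_self
    simp only [List.cons_append, pvScanA, foldA_eq c hc, if_neg hne]
    exact ih (fun x hx => h x (List.mem_cons_of_mem _ hx))

-- the two scans agree on lists of nonnegative candidates
lemma scanA_eq_scanB (n : Int) (l : List Int) (h : ∀ c ∈ l, 0 ≤ c) :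
    pvScanA n l = pvScanB n l := by
  induction l with
  | nil => rfl
  | cons c rest ih =>
    have hc := h c List.mem_cons_self
    simp only [pvScanA, pvScanB, foldA_eq c hc, digitSumB_eq c hc]
    by_cases hif : c + pvS c = n
    · rw [if_pos hif.symm, if_pos hif]
    · rw [if_neg (fun h => hif h.symm), if_neg hif]
      exact ih (fun x hx => h x (List.mem_cons_of_mem _ hx))

-- ===== VERDICT (by name: the statement is the Claim_ definition above) =====
theorem find_costructor_spec : Claim_equal_find_costructor := by
  intro n _
  unfold Spec_find_costructor find_costructor find_costructor_alt
  show pvScanA n (PySem.List.pyRange 0 n 1)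
      = pvScanB n (PySem.List.pyRange (max 0 (n - 9 * PySem.Str.len (PySem.Int.toStr n))) n 1)
  set lo := max 0 (n - 9 * PySem.Str.len (PySem.Int.toStr n)) with hlo
  by_cases hn : n ≤ 0
  · rw [PySem.List.pyRange_one_eq_nil hn, PySem.List.pyRange_one_eq_nil (by omega : n ≤ lo)]
    rfl
  · push Not at hn
    have hlo0 : 0 ≤ lo := le_max_left _ _
    have hlon : lo ≤ n := by
      have : 0 ≤ PySem.Str.len (PySem.Int.toStr n) := by
        rw [PySem.Str.len_eq]; positivity
      omega
    rw [PySem.List.pyRange_one_append 0 lo n hlo0 hlon,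
        scanA_append_no_hit n _ _ ?_,
        scanA_eq_scanB n _ (fun c hc => ((PySem.List.mem_pyRange_one).mp hc).1.trans' hlo0)]
    intro c hc
    obtain ⟨hc0, hclo⟩ := (PySem.List.mem_pyRange_one).mp hc
    refine ⟨hc0, ?_⟩
    have hb := pvS_le c n hc0 (by omega)
    omega
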